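-- pv_equiv track=rewrite | github.com/Gotoxico/TrabalhoPraticoPAA | Algoritmos.py | gerar_array_teorema2_formacao
-- ===== SOURCE A (Python) =====
-- def gerar_array_teorema2_formacao(tamanho):
--     """Gera o array do Teorema 2 seguindo a lei de formação: 2^p * 3^q."""
--     array = set()
--     p = 0
--     while True:
--         q = 0
--         while True:
--             valor = 2 ** p * 3 ** q
--             if valor >= tamanho:
--                 break
--             array.add(valor)
--             q += 1
--         if 2 ** p >= tamanho:
--             break
--         p += 1
--     return sorted(array)
-- ===== SOURCE B (Python) =====
-- def gerar_array_teorema2_formacao(tamanho):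
--     """Gera o array do Teorema 2 (2^p * 3^q < tamanho) como fusao de fluxos ordenados."""
--     def merge(xs, ys):
--         if not xs:
--             return ys
--         if not ys:
--             return xs
--         if xs[0] <= ys[0]:
--             return [xs[0]] + merge(xs[1:], ys)
--         return [ys[0]] + merge(xs, ys[1:])
--
--     def stream(v):
--         # v, 3v, 9v, ... below tamanho
--         if v >= tamanho:
--             return []
--         return [v] + stream(3 * v)
--
--     res = []
--     p2 = 1
--     while p2 < tamanho:
--         res = merge(res, stream(p2))
--         p2 *= 2
--     return res
-- ===== Notes on version B (the rewrite author's own statement) =====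
-- stated objective: alternative
-- what changed: Replaces A's nested exponent loops collecting into a set plus a final sort by a merge of sorted geometric streams: for each power of two p2 below tamanho, the stream of p2 times successive powers of three below tamanho is merged into the already sorted, duplicate-free result, so no set and no final sort are needed.
import Mathlib
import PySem

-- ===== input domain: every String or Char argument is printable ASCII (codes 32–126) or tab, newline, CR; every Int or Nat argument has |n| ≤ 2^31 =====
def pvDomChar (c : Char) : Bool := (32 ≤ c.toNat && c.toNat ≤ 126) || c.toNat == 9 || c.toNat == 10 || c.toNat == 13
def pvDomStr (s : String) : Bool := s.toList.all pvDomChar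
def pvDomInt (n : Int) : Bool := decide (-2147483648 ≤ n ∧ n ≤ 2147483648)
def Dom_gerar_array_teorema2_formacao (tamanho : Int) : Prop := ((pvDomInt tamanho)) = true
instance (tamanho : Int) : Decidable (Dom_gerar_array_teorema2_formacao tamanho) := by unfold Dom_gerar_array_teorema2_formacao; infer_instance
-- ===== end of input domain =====

-- B replaces A's nested exponent loops + set + sort by merging the sorted streams 2^p·(1,3,9,…) < tamanho, so the result comes out sorted and distinct with no set and no final sort (objective: alternative).

-- ===== PORT A =====
-- inner 'while True' over q; 'array.add(valor)' is PySem.Set.add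
def pvInnerA (t : Int) (p q : Nat) (arr : PySem.Set Int) : PySem.Set Int :=
  let valor := (2:Int)^p * (3:Int)^q
  if valor ≥ t then arr
  else pvInnerA t p (q+1) (PySem.Set.add arr valor)
termination_by (t - (2:Int)^p * (3:Int)^q).toNat
decreasing_by
  have h1 : (0:Int) < (2:Int)^p * (3:Int)^q := by positivity
  have h2 : (2:Int)^p * (3:Int)^(q+1) = ((2:Int)^p * (3:Int)^q) * 3 := by ring
  simp only [not_le] at *
  omega

-- outer 'while True' over p
def pvOuterA (t : Int) (p : Nat) (arr : PySem.Set Int) : PySem.Set Int :=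
  let arr' := pvInnerA t p 0 arr
  if (2:Int)^p ≥ t then arr'
  else pvOuterA t (p+1) arr'
termination_by (t - (2:Int)^p).toNat
decreasing_by
  have h1 : (0:Int) < (2:Int)^p := by positivity
  simp only [not_le] at *
  omega

def gerar_array_teorema2_formacao (tamanho : Int) : List Int :=
  PySem.List.sorted (pvOuterA tamanho 0 PySem.Set.empty) (fun x => x) false

-- ===== PORT B =====
-- recursive two-list merge, as in Source B
def pvMergeB (xs ys : List Int) : List Int :=
  match xs, ys with
  | [], ys => ys
  | xs, [] => xs
  | x :: xs', y :: ys' =>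
      if x ≤ y then x :: pvMergeB xs' (y :: ys')
      else y :: pvMergeB (x :: xs') ys'

-- stream v, 3v, 9v, … below t  (0 < v carried for termination)
def pvStreamB (t v : Int) (hv : 0 < v) : List Int :=
  if v ≥ t then []
  else v :: pvStreamB t (3*v) (by omega)
termination_by (t - v).toNat
decreasing_by simp only [not_le] at *; omega

-- 'while p2 < tamanho: res = merge(res, stream(p2)); p2 *= 2'
def pvLoopB (t p2 : Int) (hp : 0 < p2) (res : List Int) : List Int :=
  if p2 < t then pvLoopB t (p2*2) (by omega) (pvMergeB res (pvStreamB t p2 hp))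
  else res
termination_by (t - p2).toNat
decreasing_by omega

def gerar_array_teorema2_formacao_alt (tamanho : Int) : List Int :=
  pvLoopB tamanho 1 (by omega) []

-- ===== PRECONDITION & SPEC =====
def Spec_gerar_array_teorema2_formacao (tamanho : Int) (out : List Int) : Prop := out = gerar_array_teorema2_formacao_alt tamanho
instance (tamanho : Int) (out : List Int) : Decidable (Spec_gerar_array_teorema2_formacao tamanho out) := by unfold Spec_gerar_array_teorema2_formacao; infer_instance

-- ===== CLAIM (what is proved, stated in full; the proofs are below) =====
def Claim_equal_gerar_array_teorema2_formacao : Prop := ∀ (tamanho : Int), Dom_gerar_array_teorema2_formacao tamanho → Spec_gerar_array_teorema2_formacao tamanho (gerar_array_teorema2_formacao tamanho)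

-- ===== LEMMAS AND PROOFS =====

theorem pv_pow3_mod2 (q : Nat) : (3:Int)^q % 2 = 1 := by
  induction q with
  | zero => decide
  | succ q ih =>
    have h : (3:Int)^(q+1) = (3:Int)^q * 3 := by ring
    omega

theorem pv_pow3_inj (q q' : Nat) (h : (3:Int)^q = (3:Int)^q') : q = q' := by
  rcases Nat.lt_trichotomy q q' with hlt | heq | hgt
  · have := pow_lt_pow_right₀ (by norm_num : (1:Int) < 3) hlt; omega
  · exact heq
  · have := pow_lt_pow_right₀ (by norm_num : (1:Int) < 3) hgt; omega

theorem pv_pow23_inj : ∀ (p p' q q' : Nat), (2:Int)^p * (3:Int)^q = (2:Int)^p' * (3:Int)^q' → p = p' ∧ q = q' := by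
  intro p
  induction p with
  | zero =>
    intro p' q q' h
    cases p' with
    | zero =>
      simp only [pow_zero, one_mul] at h
      exact ⟨rfl, pv_pow3_inj _ _ h⟩
    | succ p' =>
      exfalso
      have h1 := pv_pow3_mod2 q
      have h2 : (2:Int)^(p'+1) * (3:Int)^q' = 2 * ((2:Int)^p' * (3:Int)^q') := by ring
      simp only [pow_zero, one_mul] at h
      omega
  | succ p ih =>
    intro p' q q' h
    cases p' with
    | zero =>
      exfalso
      have h1 := pv_pow3_mod2 q'
      have h2 : (2:Int)^(p+1) * (3:Int)^q = 2 * ((2:Int)^p * (3:Int)^q) := by ring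
      simp only [pow_zero, one_mul] at h
      omega
    | succ p' =>
      have h2 : (2:Int)^(p+1) * (3:Int)^q = 2 * ((2:Int)^p * (3:Int)^q) := by ring
      have h3 : (2:Int)^(p'+1) * (3:Int)^q' = 2 * ((2:Int)^p' * (3:Int)^q') := by ring
      have h4 : (2:Int)^p * (3:Int)^q = (2:Int)^p' * (3:Int)^q' := by omega
      obtain ⟨hp, hq⟩ := ih p' q q' h4
      omega

theorem pv_mem_innerA (t : Int) (p q : Nat) (arr : PySem.Set Int) (x : Int) :
    x ∈ pvInnerA t p q arr ↔ x ∈ arr ∨ ∃ j : Nat, x = (2:Int)^p * (3:Int)^(q+j) ∧ x < t := by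
  fun_induction pvInnerA t p q arr with
  | case1 q arr valor hstop =>
    simp only [ge_iff_le] at hstop
    constructor
    · intro hx; exact Or.inl hx
    · rintro (hx | ⟨j, hxe, hxt⟩)
      · exact hx
      · exfalso
        have h3 : (3:Int)^q ≤ (3:Int)^(q+j) := pow_le_pow_right₀ (by norm_num) (by omega)
        have h2 : (0:Int) < (2:Int)^p := by positivity
        have : (2:Int)^p * (3:Int)^q ≤ (2:Int)^p * (3:Int)^(q+j) :=
          mul_le_mul_of_nonneg_left h3 (le_of_lt h2)
        omega
  | case2 q arr valor hgo ih =>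
    rw [ih, PySem.Set.mem_add]
    simp only [ge_iff_le, not_le] at hgo
    constructor
    · rintro ((hx | hx) | ⟨j, hxe, hxt⟩)
      · exact Or.inl hx
      · exact Or.inr ⟨0, by simpa using hx, by omega⟩
      · exact Or.inr ⟨j+1, by rw [hxe]; ring_nf, hxt⟩
    · rintro (hx | ⟨j, hxe, hxt⟩)
      · exact Or.inl (Or.inl hx)
      · cases j with
        | zero => exact Or.inl (Or.inr (by simpa using hxe))
        | succ j => exact Or.inr ⟨j, by rw [hxe]; ring_nf, hxt⟩

theorem pv_mem_outerA (t : Int) (p : Nat) (arr : PySem.Set Int) (x : Int) :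
    x ∈ pvOuterA t p arr ↔ x ∈ arr ∨ ∃ i q : Nat, x = (2:Int)^(p+i) * (3:Int)^q ∧ x < t := by
  fun_induction pvOuterA t p arr with
  | case1 p arr arr' hstop =>
    simp only [ge_iff_le] at hstop
    rw [show arr' = pvInnerA t p 0 arr from rfl, pv_mem_innerA]
    constructor
    · rintro (hx | ⟨j, hxe, hxt⟩)
      · exact Or.inl hx
      · exact Or.inr ⟨0, j, by simpa using hxe, hxt⟩
    · rintro (hx | ⟨i, q, hxe, hxt⟩)
      · exact Or.inl hx
      · exfalso
        have h2 : (2:Int)^p ≤ (2:Int)^(p+i) := pow_le_pow_right₀ (by norm_num) (by omega)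
        have h3 : (1:Int) ≤ (3:Int)^q := one_le_pow₀ (by norm_num)
        have h4 : (0:Int) < (2:Int)^(p+i) := by positivity
        nlinarith
  | case2 p arr arr' hgo ih =>
    rw [ih, show arr' = pvInnerA t p 0 arr from rfl, pv_mem_innerA]
    constructor
    · rintro ((hx | ⟨j, hxe, hxt⟩) | ⟨i, q, hxe, hxt⟩)
      · exact Or.inl hx
      · exact Or.inr ⟨0, j, by simpa using hxe, hxt⟩
      · exact Or.inr ⟨i+1, q, by rw [hxe]; ring_nf, hxt⟩
    · rintro (hx | ⟨i, q, hxe, hxt⟩)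
      · exact Or.inl (Or.inl hx)
      · cases i with
        | zero => exact Or.inl (Or.inr ⟨q, by simpa using hxe, hxt⟩)
        | succ i => exact Or.inr ⟨i, q, by rw [hxe]; ring_nf, hxt⟩

theorem pv_nodup_innerA (t : Int) (p q : Nat) (arr : PySem.Set Int) (h : arr.Nodup) :
    (pvInnerA t p q arr).Nodup := by
  fun_induction pvInnerA t p q arr with
  | case1 => exact h
  | case2 q arr valor hgo ih => exact ih (PySem.Set.nodup_add _ _ h)

theorem pv_nodup_outerA (t : Int) (p : Nat) (arr : PySem.Set Int) (h : arr.Nodup) :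
    (pvOuterA t p arr).Nodup := by
  fun_induction pvOuterA t p arr with
  | case1 p arr arr' => exact pv_nodup_innerA t p 0 arr h
  | case2 p arr arr' hgo ih => exact ih (pv_nodup_innerA t p 0 arr h)

-- ===== B-side lemmas =====

theorem pv_merge_perm (xs ys : List Int) : (pvMergeB xs ys).Perm (xs ++ ys) := by
  fun_induction pvMergeB xs ys with
  | case1 ys => simp
  | case2 xs h => simp
  | case3 x xs' y ys' hle ih => simpa using ih.cons x
  | case4 x xs' y ys' hgt ih =>
    exact (ih.cons y).trans List.perm_middle.symm

theorem pv_mem_merge (xs ys : List Int) (x : Int) : x ∈ pvMergeB xs ys ↔ x ∈ xs ∨ x ∈ ys := by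
  rw [(pv_merge_perm xs ys).mem_iff]; simp

theorem pv_merge_pairwise (xs ys : List Int) (hxs : xs.Pairwise (· < ·)) (hys : ys.Pairwise (· < ·))
    (hdisj : ∀ a ∈ xs, ∀ b ∈ ys, a ≠ b) : (pvMergeB xs ys).Pairwise (· < ·) := by
  fun_induction pvMergeB xs ys with
  | case1 ys => exact hys
  | case2 xs h => exact hxs
  | case3 x xs' y ys' hle ih =>
    rw [List.pairwise_cons] at hxs ⊢
    refine ⟨?_, ih hxs.2 hys (fun a ha => hdisj a (List.mem_cons_of_mem x ha))⟩
    intro z hz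
    rw [pv_mem_merge] at hz
    have hxy : x < y := lt_of_le_of_ne hle (hdisj x (List.mem_cons_self ..) y (List.mem_cons_self ..))
    rcases hz with hz | hz
    · exact hxs.1 z hz
    · rcases List.mem_cons.mp hz with rfl | hz
      · exact hxy
      · exact lt_trans hxy ((List.pairwise_cons.mp hys).1 z hz)
  | case4 x xs' y ys' hgt ih =>
    rw [List.pairwise_cons] at hys ⊢
    refine ⟨?_, ih hxs hys.2 (fun a ha b hb => hdisj a ha b (List.mem_cons_of_mem y hb))⟩
    intro z hz
    rw [pv_mem_merge] at hz
    have hyx : y < x := by omega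
    rcases hz with hz | hz
    · rcases List.mem_cons.mp hz with rfl | hz
      · exact hyx
      · exact lt_trans hyx ((List.pairwise_cons.mp hxs).1 z hz)
    · exact hys.1 z hz

theorem pv_stream_spec (t v : Int) (hv : 0 < v) :
    (pvStreamB t v hv).Pairwise (· < ·) ∧
    (∀ x ∈ pvStreamB t v hv, v ≤ x) ∧
    (∀ x, x ∈ pvStreamB t v hv ↔ ∃ q : Nat, x = v * (3:Int)^q ∧ x < t) := by
  fun_induction pvStreamB t v hv with
  | case1 v hv hstop =>
    simp only [ge_iff_le] at hstop
    refine ⟨List.Pairwise.nil, by simp, ?_⟩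
    intro x
    simp only [List.not_mem_nil, false_iff, not_exists]
    rintro q ⟨rfl, hxt⟩
    have h3 : (1:Int) ≤ (3:Int)^q := one_le_pow₀ (by norm_num)
    nlinarith
  | case2 v hv hgo ih =>
    simp only [ge_iff_le, not_le] at hgo
    obtain ⟨ihpw, ihlb, ihmem⟩ := ih
    refine ⟨?_, ?_, ?_⟩
    · rw [List.pairwise_cons]
      exact ⟨fun z hz => by have := ihlb z hz; omega, ihpw⟩
    · intro x hx
      rcases List.mem_cons.mp hx with rfl | hx
      · omega
      · have := ihlb x hx; omega
    · intro x
      rw [List.mem_cons, ihmem]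
      constructor
      · rintro (rfl | ⟨q, rfl, hxt⟩)
        · exact ⟨0, by simp, hgo⟩
        · exact ⟨q+1, by ring_nf, hxt⟩
      · rintro ⟨q, rfl, hxt⟩
        cases q with
        | zero => exact Or.inl (by simp)
        | succ q => exact Or.inr ⟨q, by ring_nf, hxt⟩

theorem pv_loopB_spec (t : Int) : ∀ (p2 : Int) (hp : 0 < p2) (res : List Int) (i : Nat),
    p2 = (2:Int)^i →
    res.Pairwise (· < ·) →
    (∀ x, x ∈ res ↔ ∃ j q : Nat, j < i ∧ x = (2:Int)^j * (3:Int)^q ∧ x < t) →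
    (pvLoopB t p2 hp res).Pairwise (· < ·) ∧
    (∀ x, x ∈ pvLoopB t p2 hp res ↔ ∃ p q : Nat, x = (2:Int)^p * (3:Int)^q ∧ x < t) := by
  intro p2 hp res
  fun_induction pvLoopB t p2 hp res with
  | case1 p2 hp res hgo ih =>
    intro i hpi hpw hmem
    have hstream := pv_stream_spec t p2 hp
    refine ih (i+1) (by rw [hpi]; ring) ?_ ?_
    · refine pv_merge_pairwise _ _ hpw hstream.1 ?_
      intro a ha b hb hab
      rw [hmem] at ha
      obtain ⟨j, q, hji, rfl, _⟩ := ha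
      obtain ⟨q', rfl, _⟩ := (hstream.2.2 b).mp hb
      rw [hpi] at hab
      have := pv_pow23_inj j i q q' hab
      omega
    · intro x
      rw [pv_mem_merge, hmem, hstream.2.2 x]
      constructor
      · rintro (⟨j, q, hji, hxe, hxt⟩ | ⟨q, hxe, hxt⟩)
        · exact ⟨j, q, by omega, hxe, hxt⟩
        · exact ⟨i, q, by omega, by rw [hxe, hpi], hxt⟩
      · rintro ⟨j, q, hji, hxe, hxt⟩
        rcases Nat.lt_or_ge j i with hlt | hge
        · exact Or.inl ⟨j, q, hlt, hxe, hxt⟩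
        · have : j = i := by omega
          subst this
          exact Or.inr ⟨q, by rw [hxe, hpi], hxt⟩
  | case2 p2 hp res hstop =>
    intro i hpi hpw hmem
    simp only [not_lt] at hstop
    refine ⟨hpw, ?_⟩
    intro x
    rw [hmem]
    constructor
    · rintro ⟨j, q, _, hxe, hxt⟩; exact ⟨j, q, hxe, hxt⟩
    · rintro ⟨j, q, hxe, hxt⟩
      refine ⟨j, q, ?_, hxe, hxt⟩
      by_contra hge
      have h2 : (2:Int)^i ≤ (2:Int)^j := pow_le_pow_right₀ (by norm_num) (by omega)
      have h3 : (1:Int) ≤ (3:Int)^q := one_le_pow₀ (by norm_num)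
      have h4 : (0:Int) < (2:Int)^j := by positivity
      nlinarith [hxe, hxt]

theorem pv_alt_eq_sorted (t : Int) :
    PySem.List.sorted (pvOuterA t 0 PySem.Set.empty) (fun x => x) false =
      gerar_array_teorema2_formacao_alt t := by
  have hB := pv_loopB_spec t 1 (by omega) [] 0 (by norm_num) List.Pairwise.nil
    (by intro x; simp)
  obtain ⟨hpw, hmem⟩ := hB
  have hperm : (pvLoopB t 1 (by omega) []).Perm (pvOuterA t 0 PySem.Set.empty) := by
    rw [List.perm_ext_iff_of_nodup (hpw.imp ne_of_lt)
      (pv_nodup_outerA t 0 PySem.Set.empty List.nodup_nil)]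
    intro a
    rw [hmem a, pv_mem_outerA]
    simp [PySem.Set.empty]
  exact PySem.List.sorted_eq_of_perm_of_pairwise_lt _ _ _ hperm hpw

-- ===== VERDICT (by name: the statement is the Claim_ definition above) =====
theorem gerar_array_teorema2_formacao_spec : Claim_equal_gerar_array_teorema2_formacao := by
  intro t _
  show gerar_array_teorema2_formacao t = gerar_array_teorema2_formacao_alt t
  rw [gerar_array_teorema2_formacao, pv_alt_eq_sorted]
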